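-- pv_equiv track=rewrite | github.com/cshif/innsight | src/innsight/services.py | _extract_amenity_tags
-- ===== SOURCE A (Python) =====
-- def _extract_amenity_tags(tags: dict) -> dict:
--     """Extract amenity tags for scoring."""
--     # Define extraction rules for each amenity
--     extraction_rules = {
--         'parking': {
--             'direct_keys': ['parking'],
--             'conditional_keys': [('parking:fee', 'no', 'yes')],  # If parking:fee=no, then parking=yes
--             'indicator_keys': []
--         },
--         'wheelchair': {
--             'direct_keys': ['wheelchair'],
--             'conditional_keys': [],
--             'indicator_keys': []
--         },
--         'kids': {
--             'direct_keys': [],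
--             'conditional_keys': [],
--             'indicator_keys': ['family_friendly', 'kids', 'children']
--         },
--         'pet': {
--             'direct_keys': [],
--             'conditional_keys': [],
--             'indicator_keys': ['pets', 'pets_allowed', 'dogs']
--         }
--     }
--
--     amenity_tags = {}
--
--     for amenity, rules in extraction_rules.items():
--         value = None
--
--         # Check direct keys first
--         for key in rules['direct_keys']:
--             if key in tags:
--                 value = tags[key]
--                 break
--
--         # Check conditional keys
--         if value is None:
--             for key, condition_value, result_value in rules['conditional_keys']:
--                 if key in tags and tags[key] == condition_value:
--                     value = result_value
--                     break
--
--         # Check indicator keys (return 'yes' if any match)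
--         if value is None:
--             for key in rules['indicator_keys']:
--                 if key in tags and tags[key] in ['yes', 'true']:
--                     value = 'yes'
--                     break
--
--         amenity_tags[amenity] = value
--
--     return amenity_tags
-- ===== SOURCE B (Python) =====
-- def _extract_amenity_tags(tags: dict) -> dict:
--     """Extract amenity tags for scoring."""
--     parking = tags.get('parking')
--     if parking is None and tags.get('parking:fee') == 'no':
--         parking = 'yes'
--     kids = 'yes' if any(tags.get(k) in ('yes', 'true') for k in ('family_friendly', 'kids', 'children')) else None
--     pet = 'yes' if any(tags.get(k) in ('yes', 'true') for k in ('pets', 'pets_allowed', 'dogs')) else None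
--     return {'parking': parking, 'wheelchair': tags.get('wheelchair'), 'kids': kids, 'pet': pet}
-- ===== Notes on version B (the rewrite author's own statement) =====
-- stated objective: simpler
-- what changed: Replaced the extraction_rules data table and the generic three-phase rule-loop machinery with flat explicit per-amenity logic (get for parking/wheelchair, one any() per indicator group).
import Mathlib
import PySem

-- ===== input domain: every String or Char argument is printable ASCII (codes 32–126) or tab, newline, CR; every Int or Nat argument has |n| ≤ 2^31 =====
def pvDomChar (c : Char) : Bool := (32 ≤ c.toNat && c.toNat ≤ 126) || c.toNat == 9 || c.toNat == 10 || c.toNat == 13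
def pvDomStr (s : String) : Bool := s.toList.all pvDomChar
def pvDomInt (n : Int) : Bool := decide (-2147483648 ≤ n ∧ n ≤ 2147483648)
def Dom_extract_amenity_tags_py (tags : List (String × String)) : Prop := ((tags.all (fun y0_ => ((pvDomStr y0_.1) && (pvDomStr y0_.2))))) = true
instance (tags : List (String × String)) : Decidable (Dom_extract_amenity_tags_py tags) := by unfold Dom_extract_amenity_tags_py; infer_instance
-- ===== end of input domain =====

-- B replaces A's extraction_rules data table and three generic rule loops by flat
-- explicit logic per amenity (objective: simpler); same return value.

-- ===== PORT A =====
-- the extraction_rules table: (amenity, (direct_keys, conditional_keys, indicator_keys))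
def pvRules : List (String × List String × List (String × String × String) × List String) :=
  [("parking", (["parking"], [("parking:fee", "no", "yes")], [])),
   ("wheelchair", (["wheelchair"], [], [])),
   ("kids", (([] : List String), ([] : List (String × String × String)), ["family_friendly", "kids", "children"])),
   ("pet", (([] : List String), ([] : List (String × String × String)), ["pets", "pets_allowed", "dogs"]))]

-- 'for key in rules["direct_keys"]: if key in tags: value = tags[key]; break'
def pvDirect (tags : List (String × String)) : List String → Option String
  | [] => none
  | k :: ks =>
    match List.lookup k tags with
    | some v => some v
    | none => pvDirect tags ks

-- 'for key, condition_value, result_value in rules["conditional_keys"]: …'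
def pvCond (tags : List (String × String)) : List (String × String × String) → Option String
  | [] => none
  | (k, c, r) :: rest => if List.lookup k tags == some c then some r else pvCond tags rest

-- 'for key in rules["indicator_keys"]: if key in tags and tags[key] in ["yes","true"]: …'
def pvIndic (tags : List (String × String)) : List String → Option String
  | [] => none
  | k :: ks =>
    match List.lookup k tags with
    | some v => if v == "yes" || v == "true" then some "yes" else pvIndic tags ks
    | none => pvIndic tags ks

-- the four amenity keys are distinct and fresh, so dict insertion appends
def extract_amenity_tags_py (tags : List (String × String)) : List (String × Option String) :=
  pvRules.foldl (fun acc r =>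
    let v0 := pvDirect tags r.2.1
    let v1 := match v0 with | some _ => v0 | none => pvCond tags r.2.2.1
    let v2 := match v1 with | some _ => v1 | none => pvIndic tags r.2.2.2
    acc ++ [(r.1, v2)]) []

-- ===== PORT B =====
-- 'any(tags.get(k) in ("yes","true") for k in keys)'
def pvAnyYes (tags : List (String × String)) (keys : List String) : Bool :=
  keys.any (fun k => List.lookup k tags == some "yes" || List.lookup k tags == some "true")

def extract_amenity_tags_py_alt (tags : List (String × String)) : List (String × Option String) :=
  let parking0 := List.lookup "parking" tags
  let parking := if parking0 == none && List.lookup "parking:fee" tags == some "no" then some "yes" else parking0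
  let kids := if pvAnyYes tags ["family_friendly", "kids", "children"] then some "yes" else none
  let pet := if pvAnyYes tags ["pets", "pets_allowed", "dogs"] then some "yes" else none
  [("parking", parking), ("wheelchair", List.lookup "wheelchair" tags), ("kids", kids), ("pet", pet)]

-- ===== PRECONDITION & SPEC =====
def Spec_extract_amenity_tags_py (tags : List (String × String)) (out : List (String × Option String)) : Prop := out = extract_amenity_tags_py_alt tags
instance (tags : List (String × String)) (out : List (String × Option String)) : Decidable (Spec_extract_amenity_tags_py tags out) := by unfold Spec_extract_amenity_tags_py; infer_instance

-- ===== CLAIM (what is proved, stated in full; the proofs are below) =====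
def Claim_equal_extract_amenity_tags_py : Prop := ∀ (tags : List (String × String)), Dom_extract_amenity_tags_py tags → Spec_extract_amenity_tags_py tags (extract_amenity_tags_py tags)

-- ===== LEMMAS AND PROOFS =====

theorem pvIndic_eq (tags : List (String × String)) (ks : List String) :
    pvIndic tags ks = if pvAnyYes tags ks then some "yes" else none := by
  induction ks with
  | nil => simp [pvIndic, pvAnyYes]
  | cons k ks ih =>
    cases h : List.lookup k tags with
    | none => simp [pvIndic, pvAnyYes, h, ih, pvAnyYes]
    | some v =>
      by_cases hv : v = "yes" ∨ v = "true" <;>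
        simp [pvIndic, pvAnyYes, h, ih, hv]

-- ===== VERDICT (by name: the statement is the Claim_ definition above) =====
theorem extract_amenity_tags_py_spec : Claim_equal_extract_amenity_tags_py := by
  intro tags _
  unfold Spec_extract_amenity_tags_py extract_amenity_tags_py extract_amenity_tags_py_alt
  simp only [pvRules, List.foldl, pvDirect, pvCond, pvIndic_eq,
    List.nil_append, List.cons_append]
  cases hp : List.lookup "parking" tags <;>
    cases hf : List.lookup "parking:fee" tags <;>
      cases hw : List.lookup "wheelchair" tags <;> simp_all [pvAnyYes] <;>
        split <;> simp_all
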